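-- pv_equiv track=rewrite | github.com/bymars/topcoder | srm674/RelationClassifier.py | isBijection
-- ===== SOURCE A (Python) =====
-- def isBijection(domain, _range):
--     l = len(domain)
--     for i in range(l):
--         for j in range(l):
--             if domain[i] == domain[j] and _range[i] != _range[j]:
--                 return "Not"
--             if _range[i] == _range[j] and domain[i] != domain[j]:
--                 return "Not"
--     return "Bijection"
-- ===== SOURCE B (Python) =====
-- def isBijection(domain, _range):
--     fwd = {}
--     bwd = {}
--     for d, r in zip(domain, _range):
--         if fwd.get(d, r) != r or bwd.get(r, d) != d:
--             return "Not"
--         fwd[d] = r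
--         bwd[r] = d
--     return "Bijection"
-- ===== Notes on version B (the rewrite author's own statement) =====
-- stated objective: faster
-- what changed: Replaced A's O(n^2) nested all-pairs conflict scan with a single pass over zip(domain,_range) maintaining two dicts (domain->range and range->domain) that detect a conflict immediately.
import Mathlib
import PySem

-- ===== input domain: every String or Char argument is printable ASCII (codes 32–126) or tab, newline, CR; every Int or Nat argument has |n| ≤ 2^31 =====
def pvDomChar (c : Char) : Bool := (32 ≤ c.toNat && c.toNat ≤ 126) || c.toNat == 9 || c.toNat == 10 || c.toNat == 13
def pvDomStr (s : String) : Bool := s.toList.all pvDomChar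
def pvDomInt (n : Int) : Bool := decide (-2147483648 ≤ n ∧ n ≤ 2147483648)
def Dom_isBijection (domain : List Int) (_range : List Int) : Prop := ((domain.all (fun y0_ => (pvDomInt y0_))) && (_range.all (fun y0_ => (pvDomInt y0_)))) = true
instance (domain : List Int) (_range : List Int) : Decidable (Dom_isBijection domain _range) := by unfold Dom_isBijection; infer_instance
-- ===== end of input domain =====

-- B replaces A's O(n^2) all-pairs conflict scan with a single pass keeping two hash maps
-- (domain→range and range→domain); objective: asymptotically faster.

-- ===== PORT A =====
-- literal port of A: nested index loops over range(len(domain)), first conflicting pair returns "Not"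
def isBijection (domain : List Int) (_range : List Int) : String :=
  let l := domain.length
  if (List.range l).any (fun i => (List.range l).any (fun j =>
      (PySem.List.pyGetD domain (i : Int) 0 == PySem.List.pyGetD domain (j : Int) 0 &&
       PySem.List.pyGetD _range (i : Int) 0 != PySem.List.pyGetD _range (j : Int) 0) ||
      (PySem.List.pyGetD _range (i : Int) 0 == PySem.List.pyGetD _range (j : Int) 0 &&
       PySem.List.pyGetD domain (i : Int) 0 != PySem.List.pyGetD domain (j : Int) 0)))
  then "Not" else "Bijection"

-- ===== PORT B =====
-- one pass over zip(domain, _range) carrying the two dictionaries; early exit on a conflict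
def pvAltGo (pairs : List (Int × Int)) (fwd bwd : PySem.Dict Int Int) : String :=
  match pairs with
  | [] => "Bijection"
  | (d, r) :: rest =>
    if PySem.Dict.getD fwd d r ≠ r ∨ PySem.Dict.getD bwd r d ≠ d then "Not"
    else pvAltGo rest (fwd.insert d r) (bwd.insert r d)

def isBijection_alt (domain : List Int) (_range : List Int) : String :=
  pvAltGo (domain.zip _range) PySem.Dict.empty PySem.Dict.empty

-- ===== PRECONDITION & SPEC =====
-- Exactly the inputs on which the Python A returns: either _range is at least as long as
-- domain (no index ever leaves _range), or A's very first loop row meets a conflicting pair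
-- before any access past the end of _range (then it returns "Not" early). On every other
-- input A raises IndexError.
def Pre_isBijection (domain : List Int) (_range : List Int) : Prop :=
  domain.length ≤ _range.length ∨
    ∃ j < _range.length, j < domain.length ∧
      ((domain.getD 0 0 = domain.getD j 0 ∧ _range.getD 0 0 ≠ _range.getD j 0) ∨
       (_range.getD 0 0 = _range.getD j 0 ∧ domain.getD 0 0 ≠ domain.getD j 0))
instance (domain : List Int) (_range : List Int) : Decidable (Pre_isBijection domain _range) := by
  unfold Pre_isBijection; infer_instance

def pvWitness_isBijection : List Int × List Int := ([1, 2], [3, 4])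

def Spec_isBijection (domain : List Int) (_range : List Int) (out : String) : Prop := out = isBijection_alt domain _range
instance (domain : List Int) (_range : List Int) (out : String) : Decidable (Spec_isBijection domain _range out) := by unfold Spec_isBijection; infer_instance

-- ===== CLAIM (what is proved, stated in full; the proofs are below) =====
def Claim_equal_isBijection : Prop := ∀ (domain : List Int) (_range : List Int), Dom_isBijection domain _range → Pre_isBijection domain _range → Spec_isBijection domain _range (isBijection domain _range)

-- ===== LEMMAS AND PROOFS =====

-- a conflicting pair of (domain, range) entries, as A's two inner tests see it
def pvConf (p q : Int × Int) : Prop := (p.1 = q.1 ∧ p.2 ≠ q.2) ∨ (p.2 = q.2 ∧ p.1 ≠ q.1)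

-- conflict-freeness of a pair list: the common specification both programs decide
def pvGood (xs : List (Int × Int)) : Prop := ∀ p ∈ xs, ∀ q ∈ xs, ¬ pvConf p q

lemma pvConf_irrefl (p : Int × Int) : ¬ pvConf p p := by
  simp [pvConf]

-- B's loop decides pvGood, given dictionaries faithfully indexing the processed prefix xs
lemma pvAltGo_char (pairs : List (Int × Int)) : ∀ (xs : List (Int × Int))
    (fwd bwd : PySem.Dict Int Int),
    pvGood xs →
    (∀ d r, fwd.get? d = some r ↔ (d, r) ∈ xs) →
    (∀ r d, bwd.get? r = some d ↔ (d, r) ∈ xs) →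
    (pvAltGo pairs fwd bwd = "Bijection" ↔ pvGood (xs ++ pairs)) := by
  induction pairs with
  | nil =>
    intro xs fwd bwd hg hf hb
    simpa [pvAltGo] using hg
  | cons p rest ih =>
    intro xs fwd bwd hg hf hb
    obtain ⟨d, r⟩ := p
    by_cases hc : PySem.Dict.getD fwd d r ≠ r ∨ PySem.Dict.getD bwd r d ≠ d
    · -- conflict detected: some earlier pair contradicts (d, r)
      have hnotgood : ¬ pvGood (xs ++ (d, r) :: rest) := by
        rcases hc with hcf | hcb
        · rcases hfw : fwd.get? d with _ | r'
          · exact absurd (PySem.Dict.getD_of_get?_eq_none fwd r hfw) hcf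
          · have hmem : (d, r') ∈ xs := (hf d r').mp hfw
            have hne : r' ≠ r := by
              have := PySem.Dict.getD_of_get?_eq_some fwd r hfw
              intro h; exact hcf (by rw [this, h])
            intro hgood
            exact hgood (d, r') (by simp [hmem]) (d, r) (by simp)
              (Or.inl ⟨rfl, hne⟩)
        · rcases hbw : bwd.get? r with _ | d'
          · exact absurd (PySem.Dict.getD_of_get?_eq_none bwd d hbw) hcb
          · have hmem : (d', r) ∈ xs := (hb r d').mp hbw
            have hne : d' ≠ d := by
              have := PySem.Dict.getD_of_get?_eq_some bwd d hbw
              intro h; exact hcb (by rw [this, h])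
            intro hgood
            exact hgood (d', r) (by simp [hmem]) (d, r) (by simp)
              (Or.inr ⟨rfl, hne⟩)
      simp only [pvAltGo, if_pos hc]
      constructor
      · intro h; exact absurd h (by decide)
      · intro h; exact absurd h hnotgood
    · -- no conflict: (d, r) is consistent with xs; recurse with updated dictionaries
      rw [not_or, not_ne_iff, not_ne_iff] at hc
      obtain ⟨hcf, hcb⟩ := hc
      have hnoxf : ∀ r', (d, r') ∈ xs → r' = r := by
        intro r' hm
        have := (hf d r').mpr hm
        have := PySem.Dict.getD_of_get?_eq_some fwd r this
        rw [this] at hcf; exact hcf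
      have hnoxb : ∀ d', (d', r) ∈ xs → d' = d := by
        intro d' hm
        have := (hb r d').mpr hm
        have := PySem.Dict.getD_of_get?_eq_some bwd d this
        rw [this] at hcb; exact hcb
      have hg' : pvGood (xs ++ [(d, r)]) := by
        rintro ⟨p1, p2⟩ hp ⟨q1, q2⟩ hq
        simp only [List.mem_append, List.mem_singleton, Prod.mk.injEq] at hp hq
        rcases hp with hp | ⟨hp1, hp2⟩ <;> rcases hq with hq | ⟨hq1, hq2⟩
        · exact hg _ hp _ hq
        · subst hq1; subst hq2
          rintro (⟨h1, h2⟩ | ⟨h1, h2⟩) <;> dsimp only at h1 h2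
          · exact h2 (hnoxf p2 (by rw [h1] at hp; exact hp))
          · exact h2 (hnoxb p1 (by rw [h1] at hp; exact hp))
        · subst hp1; subst hp2
          rintro (⟨h1, h2⟩ | ⟨h1, h2⟩) <;> dsimp only at h1 h2
          · exact h2 ((hnoxf q2 (by rw [← h1] at hq; exact hq)).symm)
          · exact h2 ((hnoxb q1 (by rw [← h1] at hq; exact hq)).symm)
        · subst hp1; subst hp2; subst hq1; subst hq2; exact pvConf_irrefl _
      have hf' : ∀ d' r', (fwd.insert d r).get? d' = some r' ↔ (d', r') ∈ xs ++ [(d, r)] := by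
        intro d' r'
        rw [PySem.Dict.get?_insert fwd d d' r]
        by_cases hd : d' = d
        · subst hd
          rw [if_pos rfl]
          simp only [List.mem_append, List.mem_singleton, Prod.mk.injEq,
            Option.some.injEq, true_and]
          constructor
          · intro h; right; exact h.symm
          · rintro (hm | hm)
            · exact (hnoxf r' hm).symm
            · exact hm.symm
        · simp only [if_neg hd, hf d' r', List.mem_append, List.mem_singleton, Prod.mk.injEq]
          constructor
          · exact fun h => Or.inl h
          · rintro (hm | ⟨hm1, _⟩)
            · exact hm
            · exact absurd hm1 hd
      have hb' : ∀ r' d', (bwd.insert r d).get? r' = some d' ↔ (d', r') ∈ xs ++ [(d, r)] := by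
        intro r' d'
        rw [PySem.Dict.get?_insert bwd r r' d]
        by_cases hr : r' = r
        · subst hr
          rw [if_pos rfl]
          simp only [List.mem_append, List.mem_singleton, Prod.mk.injEq,
            Option.some.injEq, and_true]
          constructor
          · intro h; right; exact h.symm
          · rintro (hm | hm)
            · exact (hnoxb d' hm).symm
            · exact hm.symm
        · simp only [if_neg hr, hb r' d', List.mem_append, List.mem_singleton, Prod.mk.injEq]
          constructor
          · exact fun h => Or.inl h
          · rintro (hm | ⟨_, hm2⟩)
            · exact hm
            · exact absurd hm2 hr
      have := ih (xs ++ [(d, r)]) (fwd.insert d r) (bwd.insert r d) hg' hf' hb'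
      have hcond : ¬(PySem.Dict.getD fwd d r ≠ r ∨ PySem.Dict.getD bwd r d ≠ d) := by
        simp [hcf, hcb]
      simp only [pvAltGo, if_neg hcond]
      rw [this, List.append_assoc]
      simp

lemma isBijection_alt_char (domain _range : List Int) :
    (isBijection_alt domain _range = "Bijection" ↔ pvGood (domain.zip _range)) := by
  have := pvAltGo_char (domain.zip _range) [] PySem.Dict.empty PySem.Dict.empty
    (by intro p hp; simp at hp)
    (by intro d r; simp [PySem.Dict.get?_empty])
    (by intro r d; simp [PySem.Dict.get?_empty])
  simpa [isBijection_alt] using this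

-- A's nested scan decides pvGood of the same zipped list (indices stay inside both lists)
lemma isBijection_char (domain _range : List Int)
    (hpre : domain.length ≤ _range.length) :
    (isBijection domain _range = "Bijection" ↔ pvGood (domain.zip _range)) := by
  have hlen : (domain.zip _range).length = domain.length := by
    simp only [List.length_zip]; omega
  have hget1 : ∀ i : Nat, (hi : i < domain.length) →
      PySem.List.pyGetD domain (i : Int) 0 = ((domain.zip _range)[i]'(by omega)).1 := by
    intro i hi
    rw [PySem.List.pyGetD_natCast, List.getD_eq_getElem domain 0 hi,
      List.getElem_zip]
  have hget2 : ∀ i : Nat, (hi : i < domain.length) →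
      PySem.List.pyGetD _range (i : Int) 0 = ((domain.zip _range)[i]'(by omega)).2 := by
    intro i hi
    rw [PySem.List.pyGetD_natCast, List.getD_eq_getElem _range 0 (by omega),
      List.getElem_zip]
  have hcent : (((List.range domain.length).any fun i => (List.range domain.length).any fun j =>
      (PySem.List.pyGetD domain (i : Int) 0 == PySem.List.pyGetD domain (j : Int) 0 &&
       PySem.List.pyGetD _range (i : Int) 0 != PySem.List.pyGetD _range (j : Int) 0) ||
      (PySem.List.pyGetD _range (i : Int) 0 == PySem.List.pyGetD _range (j : Int) 0 &&
       PySem.List.pyGetD domain (i : Int) 0 != PySem.List.pyGetD domain (j : Int) 0)) = true)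
      ↔ ¬ pvGood (domain.zip _range) := by
    simp only [List.any_eq_true, List.mem_range, Bool.or_eq_true, Bool.and_eq_true,
      beq_iff_eq, bne_iff_ne]
    constructor
    · rintro ⟨i, hi, j, hj, hc⟩ hgood
      refine hgood ((domain.zip _range)[i]'(by omega)) (List.getElem_mem _)
        ((domain.zip _range)[j]'(by omega)) (List.getElem_mem _) ?_
      rw [hget1 i hi, hget2 i hi, hget1 j hj, hget2 j hj] at hc
      simpa [pvConf] using hc
    · intro hngood
      by_contra hno
      apply hngood
      intro p hp q hq hconf
      obtain ⟨i, hi, hpi⟩ := List.mem_iff_getElem.mp hp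
      obtain ⟨j, hj, hqj⟩ := List.mem_iff_getElem.mp hq
      rw [hlen] at hi hj
      exact hno ⟨i, hi, j, hj, by
        rw [hget1 i hi, hget2 i hi, hget1 j hj, hget2 j hj, hpi, hqj]
        simpa [pvConf] using hconf⟩
  simp only [isBijection]
  split
  · rename_i h
    constructor
    · intro habs; exact absurd habs (by decide)
    · intro hgood; exact absurd hgood (hcent.mp h)
  · rename_i h
    have hgood : pvGood (domain.zip _range) :=
      not_not.mp (fun hng => h (hcent.mpr hng))
    simp [hgood]

lemma pvAltGo_out (pairs : List (Int × Int)) : ∀ fwd bwd,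
    pvAltGo pairs fwd bwd = "Not" ∨ pvAltGo pairs fwd bwd = "Bijection" := by
  induction pairs with
  | nil => intro fwd bwd; right; rfl
  | cons p rest ih =>
    intro fwd bwd
    obtain ⟨d, r⟩ := p
    simp only [pvAltGo]
    split
    · left; rfl
    · exact ih _ _

-- ===== VERDICT (by name: the statement is the Claim_ definition above) =====
theorem isBijection_spec : Claim_equal_isBijection := by
  intro domain _range _hdom hpre
  unfold Spec_isBijection
  by_cases hle : domain.length ≤ _range.length
  · have hA := isBijection_char domain _range hle
    have hB := isBijection_alt_char domain _range
    by_cases hg : pvGood (domain.zip _range)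
    · rw [hA.mpr hg, hB.mpr hg]
    · have h1 : isBijection domain _range = "Not" := by
        rcases (by simp only [isBijection]; split <;> simp :
          isBijection domain _range = "Not" ∨ isBijection domain _range = "Bijection") with h | h
        · exact h
        · exact absurd (hA.mp h) hg
      have h2 : isBijection_alt domain _range = "Not" := by
        rcases pvAltGo_out (domain.zip _range) PySem.Dict.empty PySem.Dict.empty with h | h
        · exact h
        · exact absurd (hB.mp h) hg
      rw [h1, h2]
  · -- _range is too short, yet A returned: a conflict with index 0 is reached first
    have hex : ∃ j, j < _range.length ∧ j < domain.length ∧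
        ((domain.getD 0 0 = domain.getD j 0 ∧ _range.getD 0 0 ≠ _range.getD j 0) ∨
         (_range.getD 0 0 = _range.getD j 0 ∧ domain.getD 0 0 ≠ domain.getD j 0)) := by
      rcases hpre with h | h
      · exact absurd h hle
      · obtain ⟨j, hj, hrest⟩ := h; exact ⟨j, hj, hrest⟩
    obtain ⟨j, hjm, hjl, hc⟩ := hex
    have h0l : 0 < domain.length := by omega
    have h0m : 0 < _range.length := by omega
    have hc' := hc
    simp only [List.getD_eq_getElem domain 0 h0l, List.getD_eq_getElem _range 0 h0m,
      List.getD_eq_getElem domain 0 hjl, List.getD_eq_getElem _range 0 hjm] at hc'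
    have hng : ¬ pvGood (domain.zip _range) := by
      intro hgood
      refine hgood ((domain.zip _range)[0]'(by simp only [List.length_zip]; omega))
        (List.getElem_mem _)
        ((domain.zip _range)[j]'(by simp only [List.length_zip]; omega))
        (List.getElem_mem _) ?_
      rw [List.getElem_zip, List.getElem_zip]
      simpa [pvConf] using hc'
    have hBnot : isBijection_alt domain _range = "Not" := by
      rcases pvAltGo_out (domain.zip _range) PySem.Dict.empty PySem.Dict.empty with h | h
      · exact h
      · exact absurd ((isBijection_alt_char domain _range).mp h) hng
    have hcond : (((List.range domain.length).any fun i => (List.range domain.length).any fun j =>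
        (PySem.List.pyGetD domain (i : Int) 0 == PySem.List.pyGetD domain (j : Int) 0 &&
         PySem.List.pyGetD _range (i : Int) 0 != PySem.List.pyGetD _range (j : Int) 0) ||
        (PySem.List.pyGetD _range (i : Int) 0 == PySem.List.pyGetD _range (j : Int) 0 &&
         PySem.List.pyGetD domain (i : Int) 0 != PySem.List.pyGetD domain (j : Int) 0)) = true) := by
      simp only [List.any_eq_true, List.mem_range, Bool.or_eq_true, Bool.and_eq_true,
        beq_iff_eq, bne_iff_ne, PySem.List.pyGetD_natCast]
      exact ⟨0, h0l, j, hjl, hc⟩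
    have hAnot : isBijection domain _range = "Not" := by
      simp only [isBijection]
      rw [if_pos hcond]
    rw [hAnot, hBnot]
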